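-- pv_equiv track=rewrite | github.com/yliu-cs/SSR | ssr/utils/prompt.py | custom_join
-- ===== SOURCE A (Python) =====
-- from typing import List
-- from enum import Enum, StrEnum
--
-- class SSRSpecialToken(StrEnum):
--     BOS_TOKEN = "<s>"
--     EOS_TOKEN = "</s>"
--     BOR_TOKEN = "<|im_start|>"
--     EOR_TOKEN = "<|im_end|>"
--     TOR_TOKEN = "<tor>"
--     IMAGE_TOKEN = "<image>"
--     DEPTH_TOKEN = "<depth>"
--
-- def custom_join(lst: List[str]) -> str:
--     if not lst:
--         return ""
--     it = iter(lst)
--     result = [next(it)]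
--     prev_is_tor = (result[0] == SSRSpecialToken.TOR_TOKEN)
--     for elem in it:
--         if prev_is_tor or elem == SSRSpecialToken.TOR_TOKEN:
--             result.append(elem)
--         else:
--             result.append(" " + elem)
--         prev_is_tor = (elem == SSRSpecialToken.TOR_TOKEN)
--     return "".join(result)
-- ===== SOURCE B (Python) =====
-- from typing import List
-- from enum import Enum, StrEnum
--
-- class SSRSpecialToken(StrEnum):
--     BOS_TOKEN = "<s>"
--     EOS_TOKEN = "</s>"
--     BOR_TOKEN = "<|im_start|>"
--     EOR_TOKEN = "<|im_end|>"
--     TOR_TOKEN = "<tor>"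
--     IMAGE_TOKEN = "<image>"
--     DEPTH_TOKEN = "<depth>"
--
-- def custom_join(lst: List[str]) -> str:
--     # Divide and conquer on the TOR token: glue the space-joined segment before
--     # the first TOR directly to the TOR and recurse on the rest.
--     tor = SSRSpecialToken.TOR_TOKEN
--     if tor not in lst:
--         return " ".join(lst)
--     i = lst.index(tor)
--     return " ".join(lst[:i]) + tor + custom_join(lst[i + 1:])
-- ===== Notes on version B (the rewrite author's own statement) =====
-- stated objective: alternative
-- what changed: Replaces A's single stateful pass threading a prev_is_tor flag with a divide-and-conquer on the TOR token: space-join the segment before the first '<tor>', concatenate the token, and recurse on the remainder, delegating all spacing to str.join.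
import Mathlib
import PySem

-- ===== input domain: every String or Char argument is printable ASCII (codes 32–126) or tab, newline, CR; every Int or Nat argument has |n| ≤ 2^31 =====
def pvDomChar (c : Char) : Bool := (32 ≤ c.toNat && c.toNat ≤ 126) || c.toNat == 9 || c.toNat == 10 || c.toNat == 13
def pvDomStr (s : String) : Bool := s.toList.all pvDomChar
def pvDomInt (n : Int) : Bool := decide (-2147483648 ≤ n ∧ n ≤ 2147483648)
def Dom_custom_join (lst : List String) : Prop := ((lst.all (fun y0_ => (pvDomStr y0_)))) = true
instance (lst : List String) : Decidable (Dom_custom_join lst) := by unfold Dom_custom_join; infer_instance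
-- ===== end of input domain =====

-- B replaces A's stateful prev_is_tor loop by recursion on the first "<tor>" token,
-- space-joining each TOR-free segment (alternative decomposition; not claimed faster).

-- ===== PORT A =====
-- Literal port of A: fold over the tail threading (result list, prev_is_tor), "".join at the end.
def custom_join (lst : List String) : String :=
  match lst with
  | [] => ""
  | h :: t =>
    let st := t.foldl
      (fun (s : List String × Bool) elem =>
        (s.1 ++ [if s.2 || elem == "<tor>" then elem else " " ++ elem], elem == "<tor>"))
      ([h], h == "<tor>")
    PySem.Str.join "" st.1

-- ===== PORT B =====
-- Port of B: if "<tor>" not in lst, " ".join(lst); else split at lst.index("<tor>") and recurse.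
def custom_join_alt (lst : List String) : String :=
  match h : PySem.List.index? lst "<tor>" with
  | none => PySem.Str.join " " lst
  | some i =>
      PySem.Str.join " " (PySem.List.slice lst none (some (i : Int))) ++ "<tor>" ++
        custom_join_alt (PySem.List.slice lst (some ((i : Int) + 1)) none)
  termination_by lst.length
  decreasing_by
    have hm : "<tor>" ∈ lst := (PySem.List.index?_isSome_iff lst "<tor>").mp (by rw [h]; rfl)
    have hs : PySem.List.slice lst (some ((i : Int) + 1)) none = lst.drop (i + 1) := by
      rw [PySem.List.slice_from lst (a := (i : Int) + 1) (by omega)]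
      congr 1
    rw [hs]
    have hpos : 0 < lst.length := List.length_pos_of_mem hm
    simp only [List.length_drop]
    omega

-- ===== PRECONDITION & SPEC =====
def Spec_custom_join (lst : List String) (out : String) : Prop := out = custom_join_alt lst
instance (lst : List String) (out : String) : Decidable (Spec_custom_join lst out) := by unfold Spec_custom_join; infer_instance

-- ===== CLAIM (what is proved, stated in full; the proofs are below) =====
def Claim_equal_custom_join : Prop := ∀ (lst : List String), Dom_custom_join lst → Spec_custom_join lst (custom_join lst)

-- ===== LEMMAS AND PROOFS =====

-- The gaps-and-elements tail of the joined string, seen from previous element a.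
def pvK (a : String) : List String → String
  | [] => ""
  | b :: t => (if a == "<tor>" || b == "<tor>" then "" else " ") ++ b ++ pvK b t

-- Reference structural form both ports are proved equal to.
def pvJ : List String → String
  | [] => ""
  | a :: t => a ++ pvK a t

theorem pv_join_empty_sep (l : List (List Char)) : PySem.Chars.join [] l = l.flatten := by
  induction l with
  | nil => simp [PySem.Chars.join_nil]
  | cons p rest ih =>
    cases rest with
    | nil => simp [PySem.Chars.join_singleton]
    | cons q r => rw [PySem.Chars.join_cons_cons]; rw [ih]; simp

theorem pv_sjoin_append_singleton (acc : List String) (x : String) :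
    PySem.Str.join "" (acc ++ [x]) = PySem.Str.join "" acc ++ x := by
  simp [PySem.Str.join, pv_join_empty_sep, String.ofList_append]

-- A's loop, resumed after element a with pieces acc accumulated, produces exactly pvK a t.
theorem pv_A_loop (t : List String) : ∀ (a : String) (acc : List String),
    PySem.Str.join "" ((t.foldl
      (fun (s : List String × Bool) elem =>
        (s.1 ++ [if s.2 || elem == "<tor>" then elem else " " ++ elem], elem == "<tor>"))
      (acc, a == "<tor>")).1)
    = PySem.Str.join "" acc ++ pvK a t := by
  induction t with
  | nil => intro a acc; simp [pvK]
  | cons b t ih =>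
    intro a acc
    simp only [List.foldl_cons]
    rw [ih b (acc ++ [if (a == "<tor>") || (b == "<tor>") then b else " " ++ b]),
        pv_sjoin_append_singleton]
    by_cases ha : a = "<tor>" <;> by_cases hb : b = "<tor>" <;>
      simp [pvK, ha, hb, String.append_assoc]

theorem pv_A_eq_J (lst : List String) : custom_join lst = pvJ lst := by
  cases lst with
  | nil => rfl
  | cons h t =>
    show PySem.Str.join "" (t.foldl _ ([h], h == "<tor>")).1 = pvJ (h :: t)
    rw [pv_A_loop t h [h]]
    simp [pvJ, PySem.Str.join, PySem.Chars.join_singleton]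

theorem pv_ofList_cons_space (t : List Char) :
    String.ofList (' ' :: t) = " " ++ String.ofList t := by
  have h : (' ' :: t) = [' '] ++ t := rfl
  rw [h, String.ofList_append]

theorem pv_sjoin_cons_cons (a b : String) (t : List String) :
    PySem.Str.join " " (a :: b :: t) = a ++ " " ++ PySem.Str.join " " (b :: t) := by
  simp [PySem.Str.join]
  rw [PySem.Chars.join_cons_cons]
  simp [pv_ofList_cons_space, String.ofList_append, String.append_assoc]

-- On a TOR-free list starting at a ≠ "<tor>", the structural form is the space-join.
theorem pv_K_no_tor (l : List String) : ∀ a : String, a ≠ "<tor>" → "<tor>" ∉ l →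
    a ++ pvK a l = PySem.Str.join " " (a :: l) := by
  induction l with
  | nil => intro a _ _; simp [pvK, PySem.Str.join, PySem.Chars.join_singleton]
  | cons b t ih =>
    intro a ha hl
    have hb : b ≠ "<tor>" := fun h => hl (by simp [h])
    have hbt : "<tor>" ∉ t := fun h => hl (by simp [h])
    rw [pv_sjoin_cons_cons, ← ih b hb hbt]
    simp [pvK, ha, hb, String.append_assoc]

theorem pv_K_tor (suf : List String) : pvK "<tor>" suf = pvJ suf := by
  cases suf with
  | nil => rfl
  | cons c t => simp [pvK, pvJ]

theorem pv_K_split (pre : List String) (suf : List String) : ∀ a : String,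
    pvK a (pre ++ "<tor>" :: suf) = pvK a pre ++ "<tor>" ++ pvJ suf := by
  induction pre with
  | nil =>
    intro a
    simp [pvK, pv_K_tor]
  | cons b p ih =>
    intro a
    simp only [List.cons_append, pvK, ih b, String.append_assoc]

theorem pv_J_split (pre suf : List String) (hp : "<tor>" ∉ pre) :
    pvJ (pre ++ "<tor>" :: suf) = PySem.Str.join " " pre ++ "<tor>" ++ pvJ suf := by
  cases pre with
  | nil =>
    show "<tor>" ++ pvK "<tor>" suf = PySem.Str.join " " [] ++ "<tor>" ++ pvJ suf
    rw [pv_K_tor]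
    simp [PySem.Str.join, PySem.Chars.join_nil]
  | cons a p =>
    have ha : a ≠ "<tor>" := fun h => hp (by simp [h])
    have hpt : "<tor>" ∉ p := fun h => hp (by simp [h])
    show a ++ pvK a (p ++ "<tor>" :: suf) = _
    rw [pv_K_split, ← String.append_assoc, ← String.append_assoc, pv_K_no_tor p a ha hpt]

theorem pv_J_no_tor (lst : List String) (h : "<tor>" ∉ lst) :
    pvJ lst = PySem.Str.join " " lst := by
  cases lst with
  | nil => simp [pvJ, PySem.Str.join, PySem.Chars.join_nil]
  | cons a t =>
    have ha : a ≠ "<tor>" := fun hh => h (by simp [hh])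
    have ht : "<tor>" ∉ t := fun hh => h (by simp [hh])
    exact pv_K_no_tor t a ha ht

theorem pv_B_eq_J (lst : List String) : custom_join_alt lst = pvJ lst := by
  induction lst using custom_join_alt.induct with
  | case1 lst h =>
    rw [custom_join_alt, h, pv_J_no_tor lst ((PySem.List.index?_eq_none_iff lst "<tor>").mp h)]
  | case2 lst i h ih =>
    obtain ⟨pre, suf, hl, hlen, hnp⟩ := (PySem.List.index?_eq_some_iff lst "<tor>" i).mp h
    have hto : PySem.List.slice lst none (some (i : Int)) = pre := by
      rw [PySem.List.slice_to lst (b := (i : Int)) (by omega)]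
      simp only [Int.toNat_natCast, hl, ← hlen, List.take_left]
    have hfrom : PySem.List.slice lst (some ((i : Int) + 1)) none = suf := by
      rw [PySem.List.slice_from lst (a := (i : Int) + 1) (by omega)]
      have : ((i : Int) + 1).toNat = i + 1 := by omega
      rw [this, hl, ← hlen]
      have hd : pre ++ "<tor>" :: suf = pre ++ ("<tor>" :: suf) := rfl
      rw [hd, List.drop_append]
      simp
    rw [custom_join_alt, h]
    simp only [hto, hfrom] at ih ⊢
    rw [ih, hl, pv_J_split pre suf hnp]

-- ===== VERDICT (by name: the statement is the Claim_ definition above) =====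
theorem custom_join_spec : Claim_equal_custom_join := by
  intro lst _
  unfold Spec_custom_join
  rw [pv_A_eq_J, pv_B_eq_J]
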